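-- pv_equiv track=rewrite | github.com/MathewMarchiano/Anomaly-Detection | AnomalyDetection/DataManagement.py | binarizeLabels
-- ===== SOURCE A (Python) =====
-- def binarizeLabels(labelDictionary):
--     updatedLabelsList = []
--     classifierList = []
--     for label in labelDictionary:
--         updatedLabelsList.append(labelDictionary[label])
--
--     codewordBits = len(updatedLabelsList[0])
--     numClasses = len(updatedLabelsList)
--     classifierIndex = 0
--     classifierNumber = 0
--     count = 1
--     #The number of indices in a classifier is equal to the number of codewords/classes.
--     #The number of classifiers is equal to the length or total number of bits in a codeword.
--     #A classifier is made by getting a particular index's value for each and every codeword in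
--     #a codebook for every element in the codewords.
--     while(classifierNumber < codewordBits):
--         tempClassifier = []
--         while(classifierIndex < numClasses):
--             count += 1
--
--             tempClassifier.append(updatedLabelsList[classifierIndex][classifierNumber])
--             classifierIndex += 1
--
--         classifierIndex = 0
--         classifierNumber += 1
--         classifierList.append(tempClassifier)
--
--     #Creating a dictionary of what all the original labels will be assumed to be using the classifiers.
--     #Will use this later before training when updating all the labels to what their new binary value will be.
--     tempDictionary = {}
--     classifierDictionaryList = []
--     for classifier in classifierList:
--         for index, origLabel in zip(classifier, labelDictionary):
--             tempDictionary[origLabel] = index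
--
--         classifierDictionaryList.append(tempDictionary)
--         tempDictionary = {}
--
--     return classifierDictionaryList
-- ===== SOURCE B (Python) =====
-- def binarizeLabels(labelDictionary):
--     labels = list(labelDictionary)
--     bits = len(labelDictionary[labels[0]])
--     return [{label: labelDictionary[label][b] for label in labels}
--             for b in range(bits)]
-- ===== Notes on version B (the rewrite author's own statement) =====
-- stated objective: simpler
-- what changed: B drops A's explicit counter-driven transpose phase and the zip-into-mutable-dict phase, building each per-bit dictionary directly by indexing each codeword at that bit position in one comprehension.
import Mathlib
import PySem

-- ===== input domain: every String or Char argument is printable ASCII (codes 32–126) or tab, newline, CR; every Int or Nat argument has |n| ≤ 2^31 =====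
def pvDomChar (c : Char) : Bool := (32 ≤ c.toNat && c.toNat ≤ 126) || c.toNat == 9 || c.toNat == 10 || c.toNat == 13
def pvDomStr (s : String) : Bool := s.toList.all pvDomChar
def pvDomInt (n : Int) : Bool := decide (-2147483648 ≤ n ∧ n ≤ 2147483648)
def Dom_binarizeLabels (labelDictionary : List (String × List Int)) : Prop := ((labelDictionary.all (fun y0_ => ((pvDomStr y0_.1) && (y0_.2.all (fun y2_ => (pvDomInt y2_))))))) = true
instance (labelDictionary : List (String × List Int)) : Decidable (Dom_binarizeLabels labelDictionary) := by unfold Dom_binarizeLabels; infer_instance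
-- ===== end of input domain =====

-- B replaces A's two-phase transpose-then-zip-into-dict construction by directly building each
-- per-bit dictionary from the codewords (objective: simpler; same asymptotic cost).

-- ===== PORT A =====
-- dict lookup labelDictionary[label]: first match in insertion order (key always present here,
-- since it is drawn from the dict's own keys, so the default [] is never the result)
def pyLookup (d : List (String × List Int)) (k : String) : List Int :=
  (((d.find? (fun q => q.1 == k)).map Prod.snd).getD [])

-- inner while: while classifierIndex < numClasses: append rows[classifierIndex][classifierNumber].
-- rows.getD i [] is exact (i < numClasses = rows.length); the inner .getD b 0 is exact under
-- Pre_ (every codeword has at least codewordBits bits; outside Pre_ Python raises IndexError).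
def innerA (rows : List (List Int)) (n b i : Nat) : List Int :=
  if i < n then ((rows.getD i []).getD b 0) :: innerA rows n b (i + 1) else []
termination_by n - i

-- outer while: while classifierNumber < codewordBits
def outerA (rows : List (List Int)) (n bits b : Nat) : List (List Int) :=
  if b < bits then innerA rows n b 0 :: outerA rows n bits (b + 1) else []
termination_by bits - b

def binarizeLabels (labelDictionary : List (String × List Int)) : List (List (String × Int)) :=
  -- for label in labelDictionary: updatedLabelsList.append(labelDictionary[label])
  let updatedLabelsList := labelDictionary.map (fun p => pyLookup labelDictionary p.1)
  -- len(updatedLabelsList[0]): exact under Pre_ (nonempty; Python raises IndexError on {})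
  let codewordBits := (updatedLabelsList.headD []).length
  let numClasses := updatedLabelsList.length
  let classifierList := outerA updatedLabelsList numClasses codewordBits 0
  -- for classifier in classifierList: zip into a fresh dict, append it
  classifierList.map (fun classifier =>
    ((classifier.zip (labelDictionary.map Prod.fst)).foldl
      (fun t p => t.insert p.2 p.1) (PySem.Dict.empty : PySem.Dict String Int)).items)

-- ===== PORT B =====
def binarizeLabels_alt (labelDictionary : List (String × List Int)) : List (List (String × Int)) :=
  let labels := labelDictionary.map Prod.fst
  -- bits = len(labelDictionary[labels[0]]); labels[0] exact under Pre_ (nonempty)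
  let bits := (pyLookup labelDictionary (labels.headD "")).length
  (List.range bits).map (fun b =>
    labels.map (fun l => (l, (pyLookup labelDictionary l).getD b 0)))

-- ===== PRECONDITION & SPEC =====
-- Pre_ excludes: the empty dict and ragged inputs where some codeword is shorter than the first
-- (Python raises IndexError there), and association lists with duplicate keys, which cannot arise
-- from a Python dict and on which the assoc-list ports' behaviour is accidental.
def Pre_binarizeLabels (labelDictionary : List (String × List Int)) : Prop :=
  labelDictionary ≠ [] ∧ (labelDictionary.map Prod.fst).Nodup ∧
  ∀ p ∈ labelDictionary, (labelDictionary.headD ("", [])).2.length ≤ p.2.length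
instance (labelDictionary : List (String × List Int)) : Decidable (Pre_binarizeLabels labelDictionary) := by
  unfold Pre_binarizeLabels; infer_instance

def pvWitness_binarizeLabels : (List (String × List Int)) := [("a", [0, 1]), ("b", [1, 0])]

def Spec_binarizeLabels (labelDictionary : List (String × List Int)) (out : List (List (String × Int))) : Prop := out = binarizeLabels_alt labelDictionary
instance (labelDictionary : List (String × List Int)) (out : List (List (String × Int))) : Decidable (Spec_binarizeLabels labelDictionary out) := by unfold Spec_binarizeLabels; infer_instance

-- ===== CLAIM (what is proved, stated in full; the proofs are below) =====
def Claim_equal_binarizeLabels : Prop := ∀ (labelDictionary : List (String × List Int)), Dom_binarizeLabels labelDictionary → Pre_binarizeLabels labelDictionary → Spec_binarizeLabels labelDictionary (binarizeLabels labelDictionary)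

-- ===== LEMMAS AND PROOFS =====

-- with distinct keys, dict lookup of a key in the list returns that entry's value
theorem pyLookup_mem {d : List (String × List Int)} (hn : (d.map Prod.fst).Nodup)
    {p : String × List Int} (hp : p ∈ d) : pyLookup d p.1 = p.2 := by
  induction d with
  | nil => cases hp
  | cons q t ih =>
    simp only [List.map_cons, List.nodup_cons] at hn
    rw [List.mem_cons] at hp
    rcases hp with rfl | hp
    · simp [pyLookup]
    · have hne : p.1 ≠ q.1 := fun h => hn.1 (h ▸ List.mem_map_of_mem hp)
      simp only [pyLookup, List.find?_cons]
      rw [show (q.1 == p.1) = false from by simp [Ne.symm hne]]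
      exact ih hn.2 hp

theorem innerA_eq (rows : List (List Int)) (b i : Nat) :
    innerA rows rows.length b i = (rows.drop i).map (fun r => r.getD b 0) := by
  rw [innerA]
  split_ifs with h
  · rw [innerA_eq rows b (i + 1), List.drop_eq_getElem_cons h, List.map_cons,
      List.getD_eq_getElem rows [] h]
  · rw [List.drop_eq_nil_of_le (by omega)]; rfl
termination_by rows.length - i

theorem outerA_eq (rows : List (List Int)) (n bits b : Nat) :
    outerA rows n bits b =
      (List.range' b (bits - b)).map (fun k => innerA rows n k 0) := by
  rw [outerA]
  split_ifs with h
  · rw [outerA_eq rows n bits (b + 1), show bits - b = (bits - (b + 1)) + 1 by omega,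
      List.range'_succ, List.map_cons]
  · rw [show bits - b = 0 by omega]; rfl
termination_by bits - b

-- folding Python-dict insertion of pairwise-fresh keys just appends the (key, value) pairs
theorem foldl_insert_items (ps : List (Int × String)) (t : PySem.Dict String Int)
    (h1 : (ps.map Prod.snd).Nodup) (h2 : ∀ p ∈ ps, t.contains p.2 = false) :
    (ps.foldl (fun t p => t.insert p.2 p.1) t).items = t.items ++ ps.map (fun p => (p.2, p.1)) := by
  induction ps generalizing t with
  | nil => simp
  | cons q r ih =>
    simp only [List.map_cons, List.nodup_cons] at h1
    simp only [List.foldl_cons]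
    rw [ih (t.insert q.2 q.1) h1.2 ?_, PySem.Dict.items_insert_of_not_contains _ _
      (h2 q (List.mem_cons_self ..))]
    · simp
    · intro p hp
      rw [PySem.Dict.contains_insert]
      have : p.2 ≠ q.2 := fun h => h1.1 (h ▸ List.mem_map_of_mem hp)
      simp [this, h2 p (List.mem_cons_of_mem _ hp)]

theorem binarizeLabels_eq_alt (d : List (String × List Int)) (hn : (d.map Prod.fst).Nodup) :
    binarizeLabels d = binarizeLabels_alt d := by
  have hrows : d.map (fun p => pyLookup d p.1) = d.map Prod.snd :=
    List.map_congr_left (fun p hp => pyLookup_mem hn hp)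
  have hbits : ((d.map Prod.snd).headD []).length
      = (pyLookup d ((d.map Prod.fst).headD "")).length := by
    cases d with
    | nil => rfl
    | cons q t => simp [pyLookup_mem hn (List.mem_cons_self ..)]
  simp only [binarizeLabels, binarizeLabels_alt]
  rw [hrows, hbits, outerA_eq, Nat.sub_zero, ← List.range_eq_range', List.map_map]
  refine List.map_congr_left (fun b _ => ?_)
  simp only [Function.comp]
  rw [innerA_eq, List.drop_zero, show (d.map Prod.snd).map (fun r => r.getD b 0)
      = d.map (fun p => p.2.getD b 0) from by rw [List.map_map]; rfl,
    List.zip_map', foldl_insert_items]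
  · rw [List.map_map, List.map_map]
    exact List.map_congr_left (fun p hp => by simp [pyLookup_mem hn hp])
  · simpa [List.map_map] using hn
  · intro p _; rfl

-- ===== VERDICT (by name: the statement is the Claim_ definition above) =====
theorem binarizeLabels_spec : Claim_equal_binarizeLabels := by
  intro d _ hpre
  exact binarizeLabels_eq_alt d hpre.2.1
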